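-- pv_equiv track=rewrite | github.com/telc/adventofcode | 2025/05/05.py | num_fresh_available
-- ===== SOURCE A (Python) =====
-- def num_fresh_available(fresh, available):
--     num_fresh = 0
--     for id in available:
--         for low, high in fresh:
--             if id >= low and id <= high:
--                 num_fresh += 1
--                 break
--     return num_fresh
-- ===== SOURCE B (Python) =====
-- def num_fresh_available(fresh, available):
--     # Merge the intervals once (sorted by low), then scan the short merged
--     # list per id, stopping as soon as low exceeds the id.
--     ints = sorted(fresh, key=lambda iv: iv[0])
--     merged = []
--     i, n = 0, len(ints)
--     while i < n:
--         low, high = ints[i]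
--         i += 1
--         while i < n and ints[i][0] <= high:
--             if ints[i][1] > high:
--                 high = ints[i][1]
--             i += 1
--         merged.append((low, high))
--     count = 0
--     for id in available:
--         for low, high in merged:
--             if low > id:
--                 break
--             if id <= high:
--                 count += 1
--                 break
--     return count
-- ===== Notes on version B (the rewrite author's own statement) =====
-- stated objective: faster
-- what changed: A scans the whole interval list per id with an early break; B sorts the intervals by low endpoint once, merges overlapping ones into a short disjoint list, and then scans only that merged list per id, stopping at the first interval starting past the id.
import Mathlib
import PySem

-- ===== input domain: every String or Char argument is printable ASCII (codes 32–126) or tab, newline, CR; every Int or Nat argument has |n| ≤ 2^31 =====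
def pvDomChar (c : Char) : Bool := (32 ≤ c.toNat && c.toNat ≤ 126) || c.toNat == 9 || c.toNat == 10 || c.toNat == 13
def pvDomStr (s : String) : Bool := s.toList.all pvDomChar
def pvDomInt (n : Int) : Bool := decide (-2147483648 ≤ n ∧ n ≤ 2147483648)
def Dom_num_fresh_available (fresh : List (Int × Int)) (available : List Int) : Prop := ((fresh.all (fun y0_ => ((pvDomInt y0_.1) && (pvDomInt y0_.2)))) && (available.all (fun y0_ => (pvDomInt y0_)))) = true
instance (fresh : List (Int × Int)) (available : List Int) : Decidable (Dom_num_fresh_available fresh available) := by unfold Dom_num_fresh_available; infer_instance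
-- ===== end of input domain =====

-- ===== PORT A =====
-- B merges the sorted intervals once and scans the short merged list per id; objective: faster.
-- inner loop of A over fresh: returns 1 at the first containing interval (the 'break'), else 0
def pvInnerA (id : Int) : List (Int × Int) → Int
  | [] => 0
  | (low, high) :: rest => if low ≤ id ∧ id ≤ high then 1 else pvInnerA id rest

def num_fresh_available (fresh : List (Int × Int)) (available : List Int) : Int :=
  available.foldl (fun num_fresh id => num_fresh + pvInnerA id fresh) 0

-- ===== PORT B =====
-- inner while of B: absorb following intervals while they start at or below `high`
def pvMergeAux (low high : Int) : List (Int × Int) → List (Int × Int)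
  | [] => [(low, high)]
  | (l2, h2) :: rest =>
    if l2 ≤ high then pvMergeAux low (if h2 > high then h2 else high) rest
    else (low, high) :: pvMergeAux l2 h2 rest

-- outer while of B over the sorted intervals
def pvMerge : List (Int × Int) → List (Int × Int)
  | [] => []
  | (l, h) :: rest => pvMergeAux l h rest

-- B's per-id scan of the merged list with the two breaks
def pvScan (id : Int) : List (Int × Int) → Int
  | [] => 0
  | (low, high) :: rest =>
    if low > id then 0 else if id ≤ high then 1 else pvScan id rest

def num_fresh_available_alt (fresh : List (Int × Int)) (available : List Int) : Int :=
  let merged := pvMerge (PySem.List.sorted fresh (fun iv => iv.1) false)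
  available.foldl (fun count id => count + pvScan id merged) 0

-- ===== PRECONDITION & SPEC =====
def Spec_num_fresh_available (fresh : List (Int × Int)) (available : List Int) (out : Int) : Prop := out = num_fresh_available_alt fresh available
instance (fresh : List (Int × Int)) (available : List Int) (out : Int) : Decidable (Spec_num_fresh_available fresh available out) := by unfold Spec_num_fresh_available; infer_instance

-- ===== CLAIM (what is proved, stated in full; the proofs are below) =====
def Claim_equal_num_fresh_available : Prop := ∀ (fresh : List (Int × Int)) (available : List Int), Dom_num_fresh_available fresh available → Spec_num_fresh_available fresh available (num_fresh_available fresh available)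

-- ===== LEMMAS AND PROOFS =====

def pvInI (low high id : Int) : Bool := decide (low ≤ id) && decide (id ≤ high)

def pvCov (fresh : List (Int × Int)) (id : Int) : Bool :=
  fresh.any (fun p => pvInI p.1 p.2 id)

theorem pvInI_iff (low high id : Int) : pvInI low high id = true ↔ (low ≤ id ∧ id ≤ high) := by
  simp [pvInI]

theorem pvCov_cons (l h id : Int) (rest : List (Int × Int)) :
    pvCov ((l, h) :: rest) id = (pvInI l h id || pvCov rest id) := by
  simp [pvCov]

theorem pvInnerA_eq_cov (id : Int) (fresh : List (Int × Int)) :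
    pvInnerA id fresh = if pvCov fresh id then 1 else 0 := by
  induction fresh with
  | nil => simp [pvInnerA, pvCov]
  | cons p rest ih =>
    obtain ⟨l, h⟩ := p
    rw [pvInnerA, pvCov_cons, ih]
    by_cases hc : l ≤ id ∧ id ≤ h
    · rw [if_pos hc, if_pos (by simp [(pvInI_iff l h id).mpr hc])]
    · have hb : pvInI l h id = false := by
        rw [Bool.eq_false_iff]; intro hx; exact hc ((pvInI_iff l h id).mp hx)
      rw [if_neg hc, hb, Bool.false_or]

theorem pvFoldCount (g : Int → Int) (p : Int → Bool)
    (hg : ∀ id, g id = if p id then 1 else 0) (xs : List Int) (c : Int) :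
    xs.foldl (fun n id => n + g id) c = c + (xs.countP p : Int) := by
  induction xs generalizing c with
  | nil => simp
  | cons x xs ih =>
    rw [List.foldl_cons, ih, List.countP_cons, hg]
    by_cases hc : p x = true
    · rw [if_pos hc, hc, if_pos rfl]; push_cast; ring
    · rw [if_neg hc, Bool.eq_false_iff.mpr hc, if_neg (by simp)]; push_cast; ring

theorem pvCov_false_of_lt (id : Int) (m : List (Int × Int)) (h : ∀ q ∈ m, id < q.1) :
    pvCov m id = false := by
  rw [pvCov, List.any_eq_false]
  intro q hq
  rw [Bool.not_eq_true, Bool.eq_false_iff]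
  intro hx
  exact absurd ((pvInI_iff q.1 q.2 id).mp hx).1 (not_le.mpr (h q hq))

theorem pvScan_eq_cov (id : Int) (m : List (Int × Int))
    (hm : m.Pairwise (fun p q => p.1 ≤ q.1)) :
    pvScan id m = if pvCov m id then 1 else 0 := by
  induction m with
  | nil => simp [pvScan, pvCov]
  | cons p rest ih =>
    obtain ⟨l, h⟩ := p
    rw [List.pairwise_cons] at hm
    rw [pvScan, pvCov_cons]
    by_cases h1 : l > id
    · rw [if_pos h1]
      have hb : pvInI l h id = false := by
        rw [Bool.eq_false_iff]; intro hx
        exact absurd ((pvInI_iff l h id).mp hx).1 (not_le.mpr h1)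
      have hr : pvCov rest id = false :=
        pvCov_false_of_lt id rest (fun q hq => lt_of_lt_of_le h1 (hm.1 q hq))
      rw [hb, hr]; simp
    · rw [if_neg h1]
      rw [not_lt] at h1
      by_cases h2 : id ≤ h
      · rw [if_pos h2, if_pos (by simp [(pvInI_iff l h id).mpr ⟨h1, h2⟩])]
      · have hb : pvInI l h id = false := by
          rw [Bool.eq_false_iff]; intro hx; exact h2 ((pvInI_iff l h id).mp hx).2
        rw [if_neg h2, ih hm.2, hb, Bool.false_or]

theorem pvInI_merge (low high l2 h2 id : Int) (h1 : low ≤ l2) (h2le : l2 ≤ high) :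
    pvInI low (if h2 > high then h2 else high) id = (pvInI low high id || pvInI l2 h2 id) := by
  rw [Bool.eq_iff_iff]
  simp only [pvInI, Bool.or_eq_true, Bool.and_eq_true, decide_eq_true_eq]
  split_ifs <;> omega

theorem pvMergeAux_cov (rest : List (Int × Int)) (low high id : Int)
    (hp : rest.Pairwise (fun p q => p.1 ≤ q.1)) (hlo : ∀ q ∈ rest, low ≤ q.1) :
    pvCov (pvMergeAux low high rest) id = (pvInI low high id || pvCov rest id) := by
  induction rest generalizing low high with
  | nil => simp [pvMergeAux, pvCov]
  | cons p rest ih =>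
    obtain ⟨l2, h2⟩ := p
    rw [List.pairwise_cons] at hp
    rw [pvMergeAux]
    by_cases hc : l2 ≤ high
    · rw [if_pos hc, ih low _ hp.2 (fun q hq => le_trans (hlo (l2, h2) List.mem_cons_self) (hp.1 q hq)),
        pvInI_merge low high l2 h2 id (hlo (l2, h2) List.mem_cons_self) hc, pvCov_cons]
      rw [Bool.or_assoc]
    · rw [if_neg hc, pvCov_cons, ih l2 h2 hp.2 hp.1, pvCov_cons]

theorem pvMergeAux_pairwise (rest : List (Int × Int)) (low high : Int)
    (hp : rest.Pairwise (fun p q => p.1 ≤ q.1)) (hlo : ∀ q ∈ rest, low ≤ q.1) :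
    (pvMergeAux low high rest).Pairwise (fun p q => p.1 ≤ q.1)
      ∧ ∀ q ∈ pvMergeAux low high rest, low ≤ q.1 := by
  induction rest generalizing low high with
  | nil =>
    refine ⟨by simp [pvMergeAux], ?_⟩
    intro q hq
    simp only [pvMergeAux, List.mem_singleton] at hq
    simp [hq]
  | cons p rest ih =>
    obtain ⟨l2, h2⟩ := p
    rw [List.pairwise_cons] at hp
    rw [pvMergeAux]
    by_cases hc : l2 ≤ high
    · rw [if_pos hc]
      exact ih low _ hp.2 (fun q hq => le_trans (hlo (l2, h2) List.mem_cons_self) (hp.1 q hq))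
    · rw [if_neg hc]
      obtain ⟨hpw, hge⟩ := ih l2 h2 hp.2 hp.1
      have hll : low ≤ l2 := hlo (l2, h2) List.mem_cons_self
      refine ⟨List.pairwise_cons.mpr ⟨fun q hq => le_trans hll (hge q hq), hpw⟩, ?_⟩
      intro q hq
      rcases List.mem_cons.mp hq with hq | hq
      · simp [hq]
      · exact le_trans hll (hge q hq)

theorem pvMerge_cov (ints : List (Int × Int)) (id : Int)
    (hp : ints.Pairwise (fun p q => p.1 ≤ q.1)) :
    pvCov (pvMerge ints) id = pvCov ints id := by
  cases ints with
  | nil => rfl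
  | cons p rest =>
    obtain ⟨l, h⟩ := p
    rw [List.pairwise_cons] at hp
    rw [pvMerge, pvMergeAux_cov rest l h id hp.2 hp.1, pvCov_cons]

theorem pvMerge_pairwise (ints : List (Int × Int))
    (hp : ints.Pairwise (fun p q => p.1 ≤ q.1)) :
    (pvMerge ints).Pairwise (fun p q => p.1 ≤ q.1) := by
  cases ints with
  | nil => exact List.Pairwise.nil
  | cons p rest =>
    obtain ⟨l, h⟩ := p
    rw [List.pairwise_cons] at hp
    exact (pvMergeAux_pairwise rest l h hp.2 hp.1).1

theorem pvCov_perm (xs ys : List (Int × Int)) (h : xs.Perm ys) (id : Int) :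
    pvCov xs id = pvCov ys id := by
  rw [pvCov, pvCov, h.any_eq]

-- ===== VERDICT (by name: the statement is the Claim_ definition above) =====
theorem num_fresh_available_spec : Claim_equal_num_fresh_available := by
  intro fresh available _
  unfold Spec_num_fresh_available num_fresh_available num_fresh_available_alt
  have hsp : (PySem.List.sorted fresh (fun iv => iv.1) false).Pairwise
      (fun p q : Int × Int => p.1 ≤ q.1) := PySem.List.sorted_pairwise fresh (fun iv => iv.1)
  have hmp := pvMerge_pairwise _ hsp
  rw [pvFoldCount _ (pvCov fresh) (fun id => pvInnerA_eq_cov id fresh),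
    pvFoldCount _ (pvCov (pvMerge (PySem.List.sorted fresh (fun iv => iv.1) false)))
      (fun id => pvScan_eq_cov id _ hmp)]
  congr 2
  apply List.countP_congr
  intro id _
  rw [pvMerge_cov _ _ hsp,
    pvCov_perm _ fresh (PySem.List.sorted_perm fresh (fun iv => iv.1) false) id]
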